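-- pv_equiv track=rewrite | github.com/chipuni/IPA | convert_moby_to_ipa.py | parse_moby
-- ===== SOURCE A (Python) =====
-- def parse_moby(moby):
--     """Turns a moby word into an array of moby characters."""
--     moby_array = []
--     in_expression = False
--     current_char = ""
--     for mobychar in moby:
--         if not in_expression and mobychar != "/":
--             moby_array.append(mobychar)
--             continue
--
--         if not in_expression and mobychar == "/":
--             in_expression = True
--             current_char = mobychar
--             continue
--
--         if in_expression:
--             current_char += mobychar
--
--             if mobychar == "/":
--                 moby_array.append(current_char)
--                 current_char = ""
--                 in_expression = False
--
--     return moby_array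
-- ===== SOURCE B (Python) =====
-- def parse_moby(moby):
--     """Turns a moby word into an array of moby characters."""
--     parts = moby.split('/')
--     out = list(parts[0])
--     for i in range(1, len(parts) - 1, 2):
--         out.append('/' + parts[i] + '/')
--         out.extend(parts[i + 1])
--     return out
-- ===== Notes on version B (the rewrite author's own statement) =====
-- stated objective: simpler
-- what changed: Replaced the per-character in_expression state machine with a single str.split('/') followed by pairwise reassembly of the segments: odd-position segments become slash-delimited expression tokens, even-position segments contribute their characters; an unpaired final segment (unterminated expression) is naturally dropped.
import Mathlib
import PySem

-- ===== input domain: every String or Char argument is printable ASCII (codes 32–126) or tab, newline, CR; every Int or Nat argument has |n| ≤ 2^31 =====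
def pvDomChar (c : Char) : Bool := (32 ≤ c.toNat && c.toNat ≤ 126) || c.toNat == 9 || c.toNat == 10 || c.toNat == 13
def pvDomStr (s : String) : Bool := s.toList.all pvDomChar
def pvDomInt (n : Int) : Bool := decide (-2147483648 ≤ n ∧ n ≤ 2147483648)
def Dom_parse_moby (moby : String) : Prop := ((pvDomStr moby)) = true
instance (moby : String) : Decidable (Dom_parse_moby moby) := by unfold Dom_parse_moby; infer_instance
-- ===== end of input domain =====

-- B replaces A's explicit in_expression state machine by split('/') plus pairwise
-- reassembly of the segments (objective: simpler); return values agree on all inputs.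

-- ===== PORT A =====
-- Literal port of A's loop body: state (moby_array, in_expression, current_char), strings as List Char.
def pvStepA := fun (st : List (List Char) × Bool × List Char) (c : Char) =>
  let arr := st.1; let inExpr := st.2.1; let cur := st.2.2
  if inExpr = false ∧ c ≠ '/' then (arr ++ [[c]], inExpr, cur)
  else if inExpr = false ∧ c = '/' then (arr, true, [c])
  else
    let cur' := cur ++ [c]
    if c = '/' then (arr ++ [cur'], false, []) else (arr, inExpr, cur')

def parse_moby (moby : String) : List String :=
  ((moby.toList.foldl pvStepA ([], false, [])).1).map String.ofList

-- ===== PORT B =====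
-- B's while loop: consume the split parts after the first one two at a time
-- ('/' + parts[i] + '/', then the single characters of parts[i+1]); stop when fewer than two remain.
def pvPairsB : List (List Char) → List (List Char)
  | a :: b :: rest => ('/' :: a ++ ['/']) :: (b.map (fun c => [c]) ++ pvPairsB rest)
  | _ => []

def parse_moby_alt (moby : String) : List String :=
  match PySem.Chars.splitOn moby.toList ['/'] with
  | [] => []   -- unreachable: split never returns an empty list
  | p0 :: rest => p0.map (fun c => String.ofList [c]) ++ (pvPairsB rest).map String.ofList

-- ===== PRECONDITION & SPEC =====
def Spec_parse_moby (moby : String) (out : List String) : Prop := out = parse_moby_alt moby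
instance (moby : String) (out : List String) : Decidable (Spec_parse_moby moby out) := by unfold Spec_parse_moby; infer_instance

-- ===== CLAIM (what is proved, stated in full; the proofs are below) =====
def Claim_equal_parse_moby : Prop := ∀ (moby : String), Dom_parse_moby moby → Spec_parse_moby moby (parse_moby moby)

-- ===== LEMMAS AND PROOFS =====

lemma pvPairsB_nil : pvPairsB [] = [] := rfl

lemma pvStepA_out_ne (arr : List (List Char)) (cur : List Char) (c : Char) (h : c ≠ '/') :
    pvStepA (arr, false, cur) c = (arr ++ [[c]], false, cur) := by simp [pvStepA, h]
lemma pvStepA_out_slash (arr : List (List Char)) (cur : List Char) :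
    pvStepA (arr, false, cur) '/' = (arr, true, ['/']) := by simp [pvStepA]
lemma pvStepA_in_ne (arr : List (List Char)) (cur : List Char) (c : Char) (h : c ≠ '/') :
    pvStepA (arr, true, cur) c = (arr, true, cur ++ [c]) := by simp [pvStepA, h]
lemma pvStepA_in_slash (arr : List (List Char)) (cur : List Char) :
    pvStepA (arr, true, cur) '/' = (arr ++ [cur ++ ['/']], false, []) := by simp [pvStepA]

/-- Splitting a char list on the single character '/'; recursive reference form. -/
def pvSplitChar : List Char → List (List Char)
  | [] => [[]]
  | c :: rest => if c = '/' then [] :: pvSplitChar rest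
                 else (pvSplitChar rest).modifyHead (c :: ·)

lemma pvSplitChar_ne_nil (l : List Char) : pvSplitChar l ≠ [] := by
  cases l with
  | nil => simp [pvSplitChar]
  | cons c rest =>
    simp only [pvSplitChar]
    split_ifs
    · simp
    · cases h : pvSplitChar rest with
      | nil => exact absurd h (pvSplitChar_ne_nil rest)
      | cons a r => simp

lemma pvGo_spec (fuel : Nat) (l cur : List Char) (acc : List (List Char))
    (h : l.length < fuel) :
    PySem.Chars.splitOn.go ['/'] fuel l cur acc
      = acc.reverse ++ (pvSplitChar l).modifyHead (cur.reverse ++ ·) := by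
  induction fuel generalizing l cur acc with
  | zero => omega
  | succ n ih =>
    cases l with
    | nil =>
      simp [PySem.Chars.splitOn.go, pvSplitChar]
    | cons c rest =>
      by_cases hc : c = '/'
      · subst hc
        simp only [PySem.Chars.splitOn.go]
        rw [if_pos (by simp)]
        simp only [List.length_singleton, List.drop_succ_cons, List.drop_zero]
        rw [ih rest [] (cur.reverse :: acc) (by simpa using Nat.lt_of_succ_lt_succ h)]
        simp only [pvSplitChar, reduceIte]
        cases hs : pvSplitChar rest with
        | nil => exact absurd hs (pvSplitChar_ne_nil rest)
        | cons a r => simp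
      · simp only [PySem.Chars.splitOn.go]
        rw [if_neg (by simp [List.isPrefixOf]; exact fun h' => hc h'.symm)]
        rw [ih rest (c :: cur) acc (by simpa using Nat.lt_of_succ_lt_succ h)]
        simp only [pvSplitChar, if_neg hc]
        cases hs : pvSplitChar rest with
        | nil => exact absurd hs (pvSplitChar_ne_nil rest)
        | cons a r => simp

lemma pvSplitOn_eq (l : List Char) :
    PySem.Chars.splitOn l ['/'] = pvSplitChar l := by
  unfold PySem.Chars.splitOn
  rw [pvGo_spec (l.length + 1) l [] [] (by omega)]
  cases hs : pvSplitChar l with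
  | nil => exact absurd hs (pvSplitChar_ne_nil l)
  | cons a r => simp

/-- Output of the tokenizer when not inside an expression. -/
def pvTokOut : List (List Char) → List (List Char)
  | [] => []
  | p0 :: rest => p0.map (fun c => [c]) ++ pvPairsB rest

/-- Output when inside an expression with accumulated `cur`: a lone remaining part
    means the expression is never closed and is dropped. -/
def pvExprOut (cur : List Char) : List (List Char) → List (List Char)
  | [] => []
  | [_] => []
  | s :: rest => (cur ++ s ++ ['/']) :: pvTokOut rest

lemma pvExprOut_slash (parts : List (List Char)) :
    pvExprOut ['/'] parts = pvPairsB parts := by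
  match parts with
  | [] => rfl
  | [s] => rfl
  | a :: b :: r => simp [pvExprOut, pvPairsB, pvTokOut]

lemma pvFold_spec (cs : List Char) :
    (∀ arr, (cs.foldl pvStepA (arr, false, [])).1 = arr ++ pvTokOut (pvSplitChar cs)) ∧
    (∀ arr cur, (cs.foldl pvStepA (arr, true, cur)).1 = arr ++ pvExprOut cur (pvSplitChar cs)) := by
  induction cs with
  | nil => exact ⟨fun arr => by simp [pvSplitChar, pvTokOut, pvPairsB_nil],
                  fun arr cur => by simp [pvSplitChar, pvExprOut]⟩
  | cons c rest ih =>
    constructor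
    · intro arr
      by_cases hc : c = '/'
      · subst hc
        rw [List.foldl_cons, pvStepA_out_slash, ih.2 arr ['/']]
        simp [pvSplitChar, pvTokOut, pvExprOut_slash]
      · rw [List.foldl_cons, pvStepA_out_ne arr [] c hc, ih.1 (arr ++ [[c]])]
        simp only [pvSplitChar, if_neg hc]
        cases hs : pvSplitChar rest with
        | nil => exact absurd hs (pvSplitChar_ne_nil rest)
        | cons p0 r => simp [pvTokOut]
    · intro arr cur
      by_cases hc : c = '/'
      · subst hc
        rw [List.foldl_cons, pvStepA_in_slash, ih.1 (arr ++ [cur ++ ['/']])]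
        simp only [pvSplitChar, reduceIte]
        cases hs : pvSplitChar rest with
        | nil => exact absurd hs (pvSplitChar_ne_nil rest)
        | cons p0 r => simp [pvExprOut, pvTokOut]
      · rw [List.foldl_cons, pvStepA_in_ne arr cur c hc, ih.2 arr (cur ++ [c])]
        simp only [pvSplitChar, if_neg hc]
        cases hs : pvSplitChar rest with
        | nil => exact absurd hs (pvSplitChar_ne_nil rest)
        | cons p0 r =>
          cases r with
          | nil => simp [pvExprOut]
          | cons q r' => simp [pvExprOut]

-- ===== VERDICT (by name: the statement is the Claim_ definition above) =====
theorem parse_moby_spec : Claim_equal_parse_moby := by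
  intro moby _
  unfold Spec_parse_moby parse_moby parse_moby_alt
  rw [pvSplitOn_eq, (pvFold_spec moby.toList).1 []]
  cases hs : pvSplitChar moby.toList with
  | nil => exact absurd hs (pvSplitChar_ne_nil moby.toList)
  | cons p0 rest => simp [pvTokOut, List.map_map]
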